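-- pv_equiv track=rewrite | github.com/airbytehq/airbyte | airbyte-integrations/connectors/source-active-directory/source_active_directory/streams/organizational_unit_objects.py | _determine_object_type
-- ===== SOURCE A (Python) =====
-- def _determine_object_type(object_classes: list) -> str:
--     """Determine the primary object type from objectClass values."""
--     if not object_classes:
--         return "unknown"
--
--     # Priority order for determining type
--     type_priorities = {
--         "user": ["user"],
--         "group": ["group"],
--         "computer": ["computer"],
--         "organizational_unit": ["organizationalUnit"],
--         "contact": ["contact"],
--         "printer": ["printQueue"],
--         "shared_folder": ["volume"],
--     }
--
--     object_classes_lower = [oc.lower() for oc in object_classes]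
--
--     for obj_type, class_names in type_priorities.items():
--         if any(cls.lower() in object_classes_lower for cls in class_names):
--             return obj_type
--
--     return "other"
-- ===== SOURCE B (Python) =====
-- _RANK = {
--     "user": (0, "user"),
--     "group": (1, "group"),
--     "computer": (2, "computer"),
--     "organizationalunit": (3, "organizational_unit"),
--     "contact": (4, "contact"),
--     "printqueue": (5, "printer"),
--     "volume": (6, "shared_folder"),
-- }
--
--
-- def _determine_object_type(object_classes: list) -> str:
--     """Determine the primary object type from objectClass values."""
--     if not object_classes:
--         return "unknown"
--     best = None
--     for oc in object_classes:
--         entry = _RANK.get(oc.lower())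
--         if entry is not None and (best is None or entry[0] < best[0]):
--             best = entry
--     return best[1] if best is not None else "other"
-- ===== Notes on version B (the rewrite author's own statement) =====
-- stated objective: alternative
-- what changed: Replaces A's per-priority rescan of the lowered list with a precomputed rank map and a single pass over object_classes that keeps the minimum-rank match.
import Mathlib
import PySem

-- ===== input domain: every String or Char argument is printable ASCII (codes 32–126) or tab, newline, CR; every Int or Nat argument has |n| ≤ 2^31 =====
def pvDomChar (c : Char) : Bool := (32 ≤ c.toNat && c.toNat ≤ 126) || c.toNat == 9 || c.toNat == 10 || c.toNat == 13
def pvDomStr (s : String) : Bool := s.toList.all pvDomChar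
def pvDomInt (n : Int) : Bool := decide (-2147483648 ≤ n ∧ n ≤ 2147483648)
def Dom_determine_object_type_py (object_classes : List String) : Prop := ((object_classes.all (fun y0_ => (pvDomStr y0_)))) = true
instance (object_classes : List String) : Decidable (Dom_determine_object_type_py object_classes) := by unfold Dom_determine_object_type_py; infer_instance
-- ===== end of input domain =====

-- B replaces A's per-priority rescan of the lowered list with a precomputed rank map and one
-- minimum-tracking pass over object_classes (objective: alternative; same return value).

-- ===== PORT A =====
-- the literal type_priorities dict of A, as an insertion-ordered association list
def pvPrios : List (String × List String) :=
  [("user", ["user"]), ("group", ["group"]), ("computer", ["computer"]),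
   ("organizational_unit", ["organizationalUnit"]), ("contact", ["contact"]),
   ("printer", ["printQueue"]), ("shared_folder", ["volume"])]

-- A's for-loop with early return over type_priorities.items()
def pvScan : List (String × List String) → List String → Option String
  | [], _ => none
  | (t, cs) :: rest, ls =>
      if cs.any (fun c => ls.contains (PySem.Str.lower c)) then some t
      else pvScan rest ls

def determine_object_type_py (object_classes : List String) : String :=
  if object_classes.isEmpty then "unknown"
  else
    let ls := object_classes.map PySem.Str.lower
    match pvScan pvPrios ls with
    | some t => t
    | none => "other"

-- ===== PORT B =====
-- B's precomputed rank map: lowercase classname -> (priority index, type)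
def pvRankD : PySem.Dict String (Nat × String) :=
  PySem.Dict.mk
    [("user", (0, "user")), ("group", (1, "group")), ("computer", (2, "computer")),
     ("organizationalunit", (3, "organizational_unit")), ("contact", (4, "contact")),
     ("printqueue", (5, "printer")), ("volume", (6, "shared_folder"))]

-- B's single pass keeping the minimum-rank match
def pvBest : List String → Option (Nat × String) → Option (Nat × String)
  | [], best => best
  | oc :: rest, best =>
      let entry := pvRankD.get? (PySem.Str.lower oc)
      pvBest rest
        (match entry, best with
         | some e, none => some e
         | some e, some b => if e.1 < b.1 then some e else some b
         | none, _ => best)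

def determine_object_type_py_alt (object_classes : List String) : String :=
  if object_classes.isEmpty then "unknown"
  else
    match pvBest object_classes none with
    | some b => b.2
    | none => "other"

-- ===== PRECONDITION & SPEC =====
def Spec_determine_object_type_py (object_classes : List String) (out : String) : Prop := out = determine_object_type_py_alt object_classes
instance (object_classes : List String) (out : String) : Decidable (Spec_determine_object_type_py object_classes out) := by unfold Spec_determine_object_type_py; infer_instance

-- ===== CLAIM (what is proved, stated in full; the proofs are below) =====
def Claim_equal_determine_object_type_py : Prop := ∀ (object_classes : List String), Dom_determine_object_type_py object_classes → Spec_determine_object_type_py object_classes (determine_object_type_py object_classes)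

-- ===== LEMMAS AND PROOFS =====

-- left-biased minimum-by-rank on optional entries (the combine step of B's loop)
def pvM (a r : Option (Nat × String)) : Option (Nat × String) :=
  match r, a with
  | some e, none => some e
  | some e, some b => if e.1 < b.1 then some e else some b
  | none, _ => a

lemma pvM_none_left (r : Option (Nat × String)) : pvM none r = r := by
  cases r <;> rfl

lemma pvM_assoc (a r p : Option (Nat × String)) : pvM (pvM a r) p = pvM a (pvM r p) := by
  rcases a with _ | ⟨i, s⟩ <;> rcases r with _ | ⟨j, t⟩ <;> rcases p with _ | ⟨k, u⟩ <;>
    [skip; skip; skip; skip; skip; skip; skip;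
     (by_cases hji : j < i <;> by_cases hkj : k < j <;> by_cases hki : k < i <;>
        simp [pvM, hji, hkj, hki] <;> first | rfl | (exfalso; omega))] <;>
    first | rfl | (simp only [pvM] <;> split_ifs <;> rfl)

lemma pvRank_none (y : String) (h0 : y ≠ "user") (h1 : y ≠ "group") (h2 : y ≠ "computer")
    (h3 : y ≠ "organizationalunit") (h4 : y ≠ "contact") (h5 : y ≠ "printqueue")
    (h6 : y ≠ "volume") : pvRankD.get? y = none := by
  simp [pvRankD, PySem.Dict.get?, Ne.symm h0, Ne.symm h1, Ne.symm h2, Ne.symm h3,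
    Ne.symm h4, Ne.symm h5, Ne.symm h6]

lemma pvBest_cons (x : String) (ls : List String) (a : Option (Nat × String)) :
    pvBest (x :: ls) a = pvBest ls (pvM a (pvRankD.get? (PySem.Str.lower x))) := rfl

lemma pvBest_acc (ls : List String) (a : Option (Nat × String)) :
    pvBest ls a = pvM a (pvBest ls none) := by
  induction ls generalizing a with
  | nil => cases a <;> simp [pvBest, pvM]
  | cons x ls ih =>
      rw [pvBest_cons x ls a, pvBest_cons x ls none, ih, pvM_assoc,
        ih (pvM none (pvRankD.get? (PySem.Str.lower x))), pvM_none_left]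

-- the membership characterisation of B's minimum-rank pass
def pvChain (ls : List String) : Option (Nat × String) :=
  if ls.contains "user" then some (0, "user")
  else if ls.contains "group" then some (1, "group")
  else if ls.contains "computer" then some (2, "computer")
  else if ls.contains "organizationalunit" then some (3, "organizational_unit")
  else if ls.contains "contact" then some (4, "contact")
  else if ls.contains "printqueue" then some (5, "printer")
  else if ls.contains "volume" then some (6, "shared_folder")
  else none

lemma pvBest_eq_chain (ocs : List String) :
    pvBest ocs none = pvChain (ocs.map PySem.Str.lower) := by
  induction ocs with
  | nil => simp [pvBest, pvChain]
  | cons x ocs ih =>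
      rw [List.map_cons, pvBest_cons, pvBest_acc, ih, pvM_none_left]
      by_cases k0 : PySem.Str.lower x = "user"
      · rw [k0, (by decide : pvRankD.get? "user" = some ((0 : Nat), "user"))]
        simp only [pvChain, List.contains_cons, beq_self_eq_true, Bool.true_or, (by decide : (("group" : String) == "user") = false), (by decide : (("computer" : String) == "user") = false), (by decide : (("organizationalunit" : String) == "user") = false), (by decide : (("contact" : String) == "user") = false), (by decide : (("printqueue" : String) == "user") = false), (by decide : (("volume" : String) == "user") = false), Bool.false_or]
        split_ifs <;> simp [pvM]
      · by_cases k1 : PySem.Str.lower x = "group"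
        · rw [k1, (by decide : pvRankD.get? "group" = some ((1 : Nat), "group"))]
          simp only [pvChain, List.contains_cons, beq_self_eq_true, Bool.true_or, (by decide : (("user" : String) == "group") = false), (by decide : (("computer" : String) == "group") = false), (by decide : (("organizationalunit" : String) == "group") = false), (by decide : (("contact" : String) == "group") = false), (by decide : (("printqueue" : String) == "group") = false), (by decide : (("volume" : String) == "group") = false), Bool.false_or]
          split_ifs <;> simp [pvM]
        · by_cases k2 : PySem.Str.lower x = "computer"
          · rw [k2, (by decide : pvRankD.get? "computer" = some ((2 : Nat), "computer"))]
            simp only [pvChain, List.contains_cons, beq_self_eq_true, Bool.true_or, (by decide : (("user" : String) == "computer") = false), (by decide : (("group" : String) == "computer") = false), (by decide : (("organizationalunit" : String) == "computer") = false), (by decide : (("contact" : String) == "computer") = false), (by decide : (("printqueue" : String) == "computer") = false), (by decide : (("volume" : String) == "computer") = false), Bool.false_or]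
            split_ifs <;> simp [pvM]
          · by_cases k3 : PySem.Str.lower x = "organizationalunit"
            · rw [k3, (by decide : pvRankD.get? "organizationalunit" = some ((3 : Nat), "organizational_unit"))]
              simp only [pvChain, List.contains_cons, beq_self_eq_true, Bool.true_or, (by decide : (("user" : String) == "organizationalunit") = false), (by decide : (("group" : String) == "organizationalunit") = false), (by decide : (("computer" : String) == "organizationalunit") = false), (by decide : (("contact" : String) == "organizationalunit") = false), (by decide : (("printqueue" : String) == "organizationalunit") = false), (by decide : (("volume" : String) == "organizationalunit") = false), Bool.false_or]
              split_ifs <;> simp [pvM]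
            · by_cases k4 : PySem.Str.lower x = "contact"
              · rw [k4, (by decide : pvRankD.get? "contact" = some ((4 : Nat), "contact"))]
                simp only [pvChain, List.contains_cons, beq_self_eq_true, Bool.true_or, (by decide : (("user" : String) == "contact") = false), (by decide : (("group" : String) == "contact") = false), (by decide : (("computer" : String) == "contact") = false), (by decide : (("organizationalunit" : String) == "contact") = false), (by decide : (("printqueue" : String) == "contact") = false), (by decide : (("volume" : String) == "contact") = false), Bool.false_or]
                split_ifs <;> simp [pvM]
              · by_cases k5 : PySem.Str.lower x = "printqueue"
                · rw [k5, (by decide : pvRankD.get? "printqueue" = some ((5 : Nat), "printer"))]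
                  simp only [pvChain, List.contains_cons, beq_self_eq_true, Bool.true_or, (by decide : (("user" : String) == "printqueue") = false), (by decide : (("group" : String) == "printqueue") = false), (by decide : (("computer" : String) == "printqueue") = false), (by decide : (("organizationalunit" : String) == "printqueue") = false), (by decide : (("contact" : String) == "printqueue") = false), (by decide : (("volume" : String) == "printqueue") = false), Bool.false_or]
                  split_ifs <;> simp [pvM]
                · by_cases k6 : PySem.Str.lower x = "volume"
                  · rw [k6, (by decide : pvRankD.get? "volume" = some ((6 : Nat), "shared_folder"))]
                    simp only [pvChain, List.contains_cons, beq_self_eq_true, Bool.true_or, (by decide : (("user" : String) == "volume") = false), (by decide : (("group" : String) == "volume") = false), (by decide : (("computer" : String) == "volume") = false), (by decide : (("organizationalunit" : String) == "volume") = false), (by decide : (("contact" : String) == "volume") = false), (by decide : (("printqueue" : String) == "volume") = false), Bool.false_or]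
                    split_ifs <;> simp [pvM]
                  · rw [pvRank_none _ k0 k1 k2 k3 k4 k5 k6, pvM_none_left]
                    simp [pvChain, Ne.symm k0, Ne.symm k1, Ne.symm k2,
                      Ne.symm k3, Ne.symm k4, Ne.symm k5, Ne.symm k6]

lemma pvLower_user : PySem.Str.lower "user" = "user" := by decide
lemma pvLower_group : PySem.Str.lower "group" = "group" := by decide
lemma pvLower_computer : PySem.Str.lower "computer" = "computer" := by decide
lemma pvLower_ou : PySem.Str.lower "organizationalUnit" = "organizationalunit" := by decide
lemma pvLower_contact : PySem.Str.lower "contact" = "contact" := by decide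
lemma pvLower_pq : PySem.Str.lower "printQueue" = "printqueue" := by decide
lemma pvLower_volume : PySem.Str.lower "volume" = "volume" := by decide

-- ===== VERDICT (by name: the statement is the Claim_ definition above) =====
theorem determine_object_type_py_spec : Claim_equal_determine_object_type_py := by
  intro ocs _
  unfold Spec_determine_object_type_py determine_object_type_py determine_object_type_py_alt
  by_cases he : ocs.isEmpty
  · simp [he]
  · simp only [he, Bool.false_eq_true, if_false]
    rw [pvBest_eq_chain]
    simp only [pvScan, pvPrios, List.any_cons, List.any_nil, Bool.or_false,
      pvLower_user, pvLower_group, pvLower_computer, pvLower_ou, pvLower_contact,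
      pvLower_pq, pvLower_volume, pvChain]
    split_ifs <;> rfl
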